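-- pv_equiv track=rewrite | github.com/k3a-uw/tcss501 | SampleCode/9_Selection.py | partition_w_median
-- ===== SOURCE A (Python) =====
-- def get_index_of_nearest_median(arr, first, second, value):
--     if first == second:
--         return first
--     else:
--         return first + arr[first:second].index(value)
--
-- def med_of_meds(arr):
--     sublists = [arr[j:j+5] for j in range(0, len(arr), 5)]
--
--     medians = []
--     for sublist in sublists:
--         medians.append(sorted(sublist)[len(sublist) // 2])
--
--     if len(medians) <= 5:
--         return sorted(medians)[len(medians) // 2]
--     else:
--         return med_of_meds(medians)
--
-- def partition_w_median(input_list, lower_idx, upper_idx):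
--     if lower_idx == upper_idx:
--         return lower_idx
--
--     nearest_median = med_of_meds(input_list[lower_idx: upper_idx])
--     median_idx = get_index_of_nearest_median(input_list, lower_idx, upper_idx, nearest_median)
--
--     tmp = input_list[lower_idx]
--     input_list[lower_idx] = input_list[median_idx]
--     input_list[median_idx] = tmp
--
--     pivot = input_list[lower_idx]
--     pivot_index = lower_idx
--     right_idx = upper_idx
--     left_idx = lower_idx + 1
--
--     while True:
--         while input_list[left_idx] < pivot and left_idx < upper_idx:
--             left_idx += 1
--
--         while input_list[right_idx] > pivot and right_idx >= lower_idx: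
--             right_idx -= 1
--
--         if left_idx < right_idx:
--             temp = input_list[left_idx]
--             input_list[left_idx] = input_list[right_idx]
--             input_list[right_idx] = temp
--         else:
--             break
--
--     input_list[pivot_index] = input_list[right_idx]
--     input_list[right_idx] = pivot
--     return right_idx
-- ===== SOURCE B (Python) =====
-- # B: same median-of-medians pivot (computed by an iterative reduction loop), but the
-- # partition itself is a counting/stable-rearrangement pass instead of A's Hoare swap
-- # scan: the returned index is lower_idx + (number of region elements below the pivot).
-- # Both mutate input_list; the resulting arrangement of the non-pivot elements differs
-- # (B's is stable) -- the proved equivalence is about the RETURN value only.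
-- def partition_w_median(input_list, lower_idx, upper_idx):
--     if lower_idx == upper_idx:
--         return lower_idx
--
--     cur = input_list[lower_idx:upper_idx]
--     while len(cur) > 5:
--         nxt = []
--         for j in range(0, len(cur), 5):
--             chunk = sorted(cur[j:j + 5])
--             nxt.append(chunk[len(chunk) // 2])
--         cur = nxt
--     pivot = sorted(cur)[len(cur) // 2]
--
--     region = input_list[lower_idx:upper_idx + 1]
--     smaller = [x for x in region if x < pivot]
--     larger = [x for x in region if x > pivot]
--     input_list[lower_idx:upper_idx + 1] = smaller + [pivot] + larger
--     return lower_idx + len(smaller)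
-- ===== Notes on version B (the rewrite author's own statement) =====
-- stated objective: alternative
-- what changed: B keeps the iterative median-of-medians pivot selection (loop instead of recursion) but replaces A's in-place Hoare swap scan entirely: it partitions the region with stable filter passes and returns lower_idx + count of region elements below the pivot; the in-place arrangement of non-pivot elements therefore differs (return value is what is proved equal).
-- outside the precondition, e.g. on partition_w_median([1, 1, 2], 0, 2): A returns 1, B returns 0; on partition_w_median([1, 2, 3], -3, 2): A returns 0, B returns -2; on partition_w_median([1, 1, 1], 0, 2): A does not finish within the time limit, B returns 0
import Mathlib
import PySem

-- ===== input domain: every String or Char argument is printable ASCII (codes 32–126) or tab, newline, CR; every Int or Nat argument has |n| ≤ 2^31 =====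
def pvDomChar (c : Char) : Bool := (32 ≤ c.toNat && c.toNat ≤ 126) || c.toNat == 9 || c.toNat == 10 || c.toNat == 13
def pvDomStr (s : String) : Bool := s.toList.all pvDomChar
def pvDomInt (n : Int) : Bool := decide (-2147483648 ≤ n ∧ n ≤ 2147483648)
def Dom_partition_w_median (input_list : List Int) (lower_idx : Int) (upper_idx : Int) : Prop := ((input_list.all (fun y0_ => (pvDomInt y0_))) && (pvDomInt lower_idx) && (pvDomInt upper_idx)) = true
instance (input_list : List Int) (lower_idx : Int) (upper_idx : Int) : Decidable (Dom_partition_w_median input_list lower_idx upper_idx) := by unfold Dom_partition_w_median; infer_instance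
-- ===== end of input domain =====

-- B selects the same median-of-medians pivot (by an iterative reduction loop) but
-- replaces A's Hoare swap scan by a counting/stable-filter partition, returning
-- lower_idx + (number of region elements below the pivot).  Both Pythons mutate
-- input_list; the arrangements differ (B's is stable) — the equivalence proved
-- here is about the RETURN value only.

-- ===== PORT A =====
-- xs[i] for an in-Pre_ index; the 0 default is the IndexError case, unreachable under Pre_.
def pvGetA (xs : List Int) (i : Int) : Int := (PySem.List.pyGet? xs i).getD 0

def get_index_of_nearest_median (arr : List Int) (first second value : Int) : Int :=
  if first = second then first
  -- .index raises ValueError when absent; the 0 default is that case, unreachable under Pre_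
  else first + ((PySem.List.index? (PySem.List.slice arr (some first) (some second)) value).getD 0 : Nat)

-- medians = []; for sublist in sublists: medians.append(sorted(sublist)[len(sublist)//2])
def pvMediansA (arr : List Int) : List Int :=
  let sublists := (PySem.List.pyRange 0 arr.length 5).map
    (fun j => PySem.List.slice arr (some j) (some (j + 5)))
  sublists.foldl
    (fun medians sublist =>
      medians ++ [PySem.List.pyGetD (PySem.List.sorted sublist id false)
                    (PySem.Int.floordiv (sublist.length : Int) 2) 0]) []

-- A's recursive med_of_meds; fuel only makes the recursion total (ample under Pre_)
def med_of_meds (fuel : Nat) (arr : List Int) : Int :=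
  match fuel with
  | 0 => 0
  | fuel + 1 =>
    let medians := pvMediansA arr
    if medians.length ≤ 5 then
      PySem.List.pyGetD (PySem.List.sorted medians id false)
        (PySem.Int.floordiv (medians.length : Int) 2) 0
    else med_of_meds fuel medians

-- tmp = xs[i]; xs[i] = xs[j]; xs[j] = tmp
def pvSwapA (xs : List Int) (i j : Int) : List Int :=
  PySem.List.pySetD (PySem.List.pySetD xs i (pvGetA xs j)) j (pvGetA xs i)

-- while input_list[left_idx] < pivot and left_idx < upper_idx: left_idx += 1
def pvLeftScanA (xs : List Int) (pivot upper_idx : Int) (left_idx : Int) : Nat → Int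
  | 0 => left_idx
  | fuel + 1 =>
    if pvGetA xs left_idx < pivot ∧ left_idx < upper_idx then
      pvLeftScanA xs pivot upper_idx (left_idx + 1) fuel
    else left_idx

-- while input_list[right_idx] > pivot and right_idx >= lower_idx: right_idx -= 1
def pvRightScanA (xs : List Int) (pivot lower_idx : Int) (right_idx : Int) : Nat → Int
  | 0 => right_idx
  | fuel + 1 =>
    if pvGetA xs right_idx > pivot ∧ right_idx ≥ lower_idx then
      pvRightScanA xs pivot lower_idx (right_idx - 1) fuel
    else right_idx

-- the 'while True' swap loop; returns the final list and right_idx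
def pvLoopA (xs : List Int) (pivot lower_idx upper_idx left_idx right_idx : Int) :
    Nat → (List Int × Int)
  | 0 => (xs, right_idx)
  | fuel + 1 =>
    let l := pvLeftScanA xs pivot upper_idx left_idx (xs.length + 2)
    let r := pvRightScanA xs pivot lower_idx right_idx (xs.length + 2)
    if l < r then pvLoopA (pvSwapA xs l r) pivot lower_idx upper_idx l r fuel
    else (xs, r)

def partition_w_median (input_list : List Int) (lower_idx : Int) (upper_idx : Int) : Int :=
  if lower_idx = upper_idx then lower_idx
  else
    let s := PySem.List.slice input_list (some lower_idx) (some upper_idx)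
    let nearest_median := med_of_meds (s.length + 1) s
    let median_idx := get_index_of_nearest_median input_list lower_idx upper_idx nearest_median
    let xs1 := pvSwapA input_list lower_idx median_idx
    let pivot := pvGetA xs1 lower_idx
    let res := pvLoopA xs1 pivot lower_idx upper_idx (lower_idx + 1) upper_idx (xs1.length + 2)
    let xs2 := res.1
    let right_idx := res.2
    let xs3 := PySem.List.pySetD xs2 lower_idx (pvGetA xs2 right_idx)
    let _xs4 := PySem.List.pySetD xs3 right_idx pivot
    right_idx

-- ===== PORT B =====
-- nxt = []; for j in range(0, len(cur), 5): chunk = sorted(cur[j:j+5]); nxt.append(chunk[len(chunk)//2])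
def pvMediansB (cur : List Int) : List Int :=
  (PySem.List.pyRange 0 cur.length 5).foldl
    (fun nxt j =>
      let chunk := PySem.List.sorted (PySem.List.slice cur (some j) (some (j + 5))) id false
      nxt ++ [PySem.List.pyGetD chunk (PySem.Int.floordiv (chunk.length : Int) 2) 0]) []

-- while len(cur) > 5: cur = nxt   (fuel only makes the loop total; ample under Pre_)
def pvReduceB (fuel : Nat) (cur : List Int) : List Int :=
  match fuel with
  | 0 => cur
  | fuel + 1 => if 5 < cur.length then pvReduceB fuel (pvMediansB cur) else cur

def partition_w_median_alt (input_list : List Int) (lower_idx : Int) (upper_idx : Int) : Int :=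
  if lower_idx = upper_idx then lower_idx
  else
    let cur0 := PySem.List.slice input_list (some lower_idx) (some upper_idx)
    let cur := pvReduceB (cur0.length + 1) cur0
    let pivot := PySem.List.pyGetD (PySem.List.sorted cur id false)
      (PySem.Int.floordiv (cur.length : Int) 2) 0
    let region := PySem.List.slice input_list (some lower_idx) (some (upper_idx + 1))
    let smaller := region.filter (fun x => decide (x < pivot))
    let larger := region.filter (fun x => decide (pivot < x))
    -- input_list[lower:upper+1] = smaller + [pivot] + larger  (in-place write-back;
    -- the mutation is not part of the returned value)
    let _written := smaller ++ [pivot] ++ larger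
    lower_idx + (smaller.length : Int)

-- ===== PRECONDITION & SPEC =====
-- Pre_ is A's natural domain: either an empty range (returned immediately) or in-range
-- bounds lower < upper < len with the INCLUSIVE region input_list[lower:upper+1]
-- duplicate-free.  Out-of-range or negative bounds (Python wraparound, possible
-- IndexError/ValueError) are excluded as outside the function's natural domain, and a
-- duplicated value in the scanned region makes A's partition depend on the accidental
-- swap order (it can even loop forever, e.g. on ([1,1,1],0,2)); the Nodup condition
-- over-approximates that, since whether a duplicate disturbs the scan depends on
-- which pivot gets selected.
def Pre_partition_w_median (input_list : List Int) (lower_idx : Int) (upper_idx : Int) : Prop :=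
  lower_idx = upper_idx ∨
    (0 ≤ lower_idx ∧ lower_idx < upper_idx ∧ upper_idx < input_list.length ∧
      (PySem.List.slice input_list (some lower_idx) (some (upper_idx + 1))).Nodup)
instance (input_list : List Int) (lower_idx : Int) (upper_idx : Int) : Decidable (Pre_partition_w_median input_list lower_idx upper_idx) := by unfold Pre_partition_w_median; infer_instance

def pvWitness_partition_w_median : List Int × Int × Int := ([3, 1, 2], 0, 2)

def Spec_partition_w_median (input_list : List Int) (lower_idx : Int) (upper_idx : Int) (out : Int) : Prop := out = partition_w_median_alt input_list lower_idx upper_idx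
instance (input_list : List Int) (lower_idx : Int) (upper_idx : Int) (out : Int) : Decidable (Spec_partition_w_median input_list lower_idx upper_idx out) := by unfold Spec_partition_w_median; infer_instance

-- ===== CLAIM (what is proved, stated in full; the proofs are below) =====
def Claim_equal_partition_w_median : Prop := ∀ (input_list : List Int) (lower_idx : Int) (upper_idx : Int), Dom_partition_w_median input_list lower_idx upper_idx → Pre_partition_w_median input_list lower_idx upper_idx → Spec_partition_w_median input_list lower_idx upper_idx (partition_w_median input_list lower_idx upper_idx)

-- ===== LEMMAS AND PROOFS =====

-- the number of region indices holding a value below p (the quantity B returns)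
def pvCnt (xs : List Int) (lo hi p : Int) : Nat :=
  (List.range (hi + 1 - lo).toNat).countP (fun k : Nat => decide (pvGetA xs (lo + (k : Int)) < p))

theorem pvGetA_nonneg (xs : List Int) (i : Int) (h : 0 ≤ i) :
    pvGetA xs i = xs.getD i.toNat 0 := by
  rw [pvGetA, PySem.List.pyGet?_of_nonneg xs h, List.getD_eq_getElem?_getD]

theorem length_pvSwapA (xs : List Int) (a b : Int) :
    (pvSwapA xs a b).length = xs.length := by
  simp [pvSwapA, PySem.List.length_pySetD]

theorem pvGetA_swap (xs : List Int) (a b i : Int) (ha0 : 0 ≤ a) (hb0 : 0 ≤ b)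
    (ha : a < (xs.length : Int)) (hb : b < (xs.length : Int)) (hi0 : 0 ≤ i) :
    pvGetA (pvSwapA xs a b) i =
      if i = b then pvGetA xs a else if i = a then pvGetA xs b else pvGetA xs i := by
  have e1 : pvSwapA xs a b
      = (xs.set a.toNat (xs.getD b.toNat 0)).set b.toNat (xs.getD a.toNat 0) := by
    rw [pvSwapA, PySem.List.pySetD_of_nonneg _ _ hb0, PySem.List.pySetD_of_nonneg _ _ ha0,
      pvGetA_nonneg _ _ ha0, pvGetA_nonneg _ _ hb0]
  rw [pvGetA_nonneg _ _ hi0, e1, List.getD_eq_getElem?_getD, List.getElem?_set]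
  by_cases h1 : i = b
  · rw [if_pos h1, if_pos (by omega : b.toNat = i.toNat),
      if_pos (by simp [List.length_set]; omega), Option.getD_some, pvGetA_nonneg _ _ ha0]
  · rw [if_neg h1, if_neg (by omega : ¬ b.toNat = i.toNat), List.getElem?_set]
    by_cases h2 : i = a
    · rw [if_pos h2, if_pos (by omega : a.toNat = i.toNat), if_pos (by omega : a.toNat < xs.length),
        Option.getD_some, pvGetA_nonneg _ _ hb0]
    · rw [if_neg h2, if_neg (by omega : ¬ a.toNat = i.toNat), pvGetA_nonneg _ _ hi0,
        List.getD_eq_getElem?_getD]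

-- ----- left/right scan characterizations -----

theorem leftScan_spec (xs : List Int) (p hi : Int) (fuel : Nat) (l : Int)
    (hl : l ≤ hi) (hf : (hi - l).toNat < fuel) :
    l ≤ pvLeftScanA xs p hi l fuel ∧ pvLeftScanA xs p hi l fuel ≤ hi ∧
    (∀ i, l ≤ i → i < pvLeftScanA xs p hi l fuel → pvGetA xs i < p) ∧
    (pvLeftScanA xs p hi l fuel = hi ∨ ¬ pvGetA xs (pvLeftScanA xs p hi l fuel) < p) := by
  induction fuel generalizing l with
  | zero => omega
  | succ n ih =>
    rw [pvLeftScanA]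
    by_cases hg : pvGetA xs l < p ∧ l < hi
    · rw [if_pos hg]
      obtain ⟨ih1, ih2, ih3, ih4⟩ := ih (l + 1) (by omega) (by omega)
      refine ⟨by omega, ih2, ?_, ih4⟩
      intro i hi1 hi2
      rcases eq_or_lt_of_le hi1 with h | h
      · exact h ▸ hg.1
      · exact ih3 i (by omega) hi2
    · rw [if_neg hg]
      refine ⟨le_refl _, hl, fun i h1 h2 => absurd (lt_of_le_of_lt h1 h2) (lt_irrefl _), ?_⟩
      by_cases hlt : pvGetA xs l < p
      · exact Or.inl (by omega)
      · exact Or.inr hlt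

theorem rightScan_spec (xs : List Int) (p lo : Int) (hplo : pvGetA xs lo = p)
    (fuel : Nat) (r : Int) (hr : lo ≤ r) (hf : (r - lo).toNat < fuel) :
    lo ≤ pvRightScanA xs p lo r fuel ∧ pvRightScanA xs p lo r fuel ≤ r ∧
    (∀ i, pvRightScanA xs p lo r fuel < i → i ≤ r → pvGetA xs i > p) ∧
    ¬ pvGetA xs (pvRightScanA xs p lo r fuel) > p := by
  induction fuel generalizing r with
  | zero => omega
  | succ n ih =>
    rw [pvRightScanA]
    by_cases hg : pvGetA xs r > p ∧ r ≥ lo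
    · have hrlo : lo < r := by
        rcases eq_or_lt_of_le hr with h | h
        · exact absurd (h ▸ hplo) (by intro hh; exact absurd (hh ▸ hg.1) (lt_irrefl p))
        · exact h
      rw [if_pos hg]
      obtain ⟨ih1, ih2, ih3, ih4⟩ := ih (r - 1) (by omega) (by omega)
      refine ⟨ih1, by omega, ?_, ih4⟩
      intro i h1 h2
      rcases eq_or_lt_of_le h2 with h | h
      · exact h ▸ hg.1
      · exact ih3 i h1 (by omega)
    · rw [if_neg hg]
      refine ⟨hr, le_refl _, fun i h1 h2 => absurd (lt_of_lt_of_le h1 h2) (lt_irrefl _), ?_⟩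
      intro hgt
      exact hg ⟨hgt, hr⟩

theorem leftScan_step (xs : List Int) (p hi l : Int) (n : Nat)
    (h : pvGetA xs l < p ∧ l < hi) :
    pvLeftScanA xs p hi l (n + 1) = pvLeftScanA xs p hi (l + 1) n := by
  rw [pvLeftScanA, if_pos h]

theorem rightScan_step (xs : List Int) (p lo r : Int) (n : Nat)
    (h : pvGetA xs r > p ∧ r ≥ lo) :
    pvRightScanA xs p lo r (n + 1) = pvRightScanA xs p lo (r - 1) n := by
  rw [pvRightScanA, if_pos h]

-- ----- counting lemmas -----

theorem countP_range_eq_card (q : Int → Prop) [DecidablePred q] (lo : Int) : ∀ m : Nat,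
    (List.range m).countP (fun k : Nat => decide (q (lo + (k : Int))))
      = ((Finset.Ico lo (lo + (m : Int))).filter q).card
  | 0 => by simp
  | (m + 1) => by
    rw [List.range_succ, List.countP_append, countP_range_eq_card q lo m]
    have hcast : lo + ((m + 1 : Nat) : Int) = (lo + (m : Int)) + 1 := by push_cast; ring
    have hins : Finset.Ico lo (lo + (m : Int) + 1)
        = insert (lo + (m : Int)) (Finset.Ico lo (lo + (m : Int))) := by
      ext x
      simp only [Finset.mem_Ico, Finset.mem_insert]
      omega
    rw [hcast, hins, Finset.filter_insert]
    by_cases hq : q (lo + (m : Int))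
    · rw [if_pos hq, Finset.card_insert_of_notMem (by simp [Finset.mem_Ico])]
      simp [hq]
    · rw [if_neg hq]
      simp [hq]

theorem pvCnt_eq_card (xs : List Int) (lo hi p : Int) (h : lo ≤ hi + 1) :
    pvCnt xs lo hi p = ((Finset.Ico lo (hi + 1)).filter (fun i => pvGetA xs i < p)).card := by
  rw [pvCnt, countP_range_eq_card (fun i => pvGetA xs i < p) lo ((hi + 1 - lo).toNat)]
  have he : lo + (((hi + 1 - lo).toNat : Nat) : Int) = hi + 1 := by omega
  rw [he]

theorem pvCnt_swap (xs : List Int) (a b lo hi p : Int) (h0 : 0 ≤ lo)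
    (ha1 : lo ≤ a) (ha2 : a ≤ hi) (hb1 : lo ≤ b) (hb2 : b ≤ hi)
    (hlen : hi < (xs.length : Int)) :
    pvCnt (pvSwapA xs a b) lo hi p = pvCnt xs lo hi p := by
  rw [pvCnt_eq_card _ _ _ _ (by omega), pvCnt_eq_card _ _ _ _ (by omega)]
  have hget : ∀ i : Int, 0 ≤ i → pvGetA (pvSwapA xs a b) i =
      if i = b then pvGetA xs a else if i = a then pvGetA xs b else pvGetA xs i :=
    fun i hi0 => pvGetA_swap xs a b i (by omega) (by omega) (by omega) (by omega) hi0
  apply Finset.card_bij' (fun i _ => if i = a then b else if i = b then a else i)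
    (fun i _ => if i = a then b else if i = b then a else i)
  · intro i hmem
    simp only [Finset.mem_filter, Finset.mem_Ico] at hmem ⊢
    obtain ⟨⟨hm1, hm2⟩, hm3⟩ := hmem
    rw [hget i (by omega)] at hm3
    by_cases h1 : i = a <;> by_cases h2 : i = b <;>
      simp only [h1, h2, if_pos] <;> subst_vars <;> simp_all
  · intro i hmem
    simp only [Finset.mem_filter, Finset.mem_Ico] at hmem ⊢
    obtain ⟨⟨hm1, hm2⟩, hm3⟩ := hmem
    constructor
    · by_cases h1 : i = a <;> by_cases h2 : i = b <;> simp [h1, h2] <;> omega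
    · rw [hget _ (by by_cases h1 : i = a <;> by_cases h2 : i = b <;> simp [h1, h2] <;> omega)]
      by_cases h1 : i = a <;> by_cases h2 : i = b <;> subst_vars <;> simp_all
  · intro i hmem
    by_cases h1 : i = a <;> by_cases h2 : i = b <;> simp [h1, h2]
  · intro i hmem
    by_cases h1 : i = a <;> by_cases h2 : i = b <;> simp [h1, h2]

theorem pvCnt_partitioned (xs : List Int) (lo hi p r' : Int)
    (h1 : lo ≤ r') (h2 : r' ≤ hi) (hplo : pvGetA xs lo = p)
    (hlt : ∀ i, lo < i → i ≤ r' → pvGetA xs i < p)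
    (hgt : ∀ i, r' < i → i ≤ hi → ¬ pvGetA xs i < p) :
    (pvCnt xs lo hi p : Int) = r' - lo := by
  rw [pvCnt_eq_card _ _ _ _ (by omega)]
  have hset : (Finset.Ico lo (hi + 1)).filter (fun i => pvGetA xs i < p)
      = Finset.Ico (lo + 1) (r' + 1) := by
    ext x
    simp only [Finset.mem_filter, Finset.mem_Ico]
    constructor
    · rintro ⟨⟨hx1, hx2⟩, hx3⟩
      have hxlo : x ≠ lo := by
        intro h
        rw [h, hplo] at hx3
        exact lt_irrefl p hx3
      have hxr : x ≤ r' := by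
        by_contra hc
        exact hgt x (by omega) (by omega) hx3
      omega
    · rintro ⟨hx1, hx2⟩
      exact ⟨⟨by omega, by omega⟩, hlt x (by omega) (by omega)⟩
  rw [hset, Int.card_Ico]
  omega

-- ----- the Hoare loop of A returns lower + (number of region elements below the pivot) -----

theorem loop_lemma (p lo hi : Int) (h0 : 0 ≤ lo) (_hlh : lo < hi) (fuel : Nat) :
    ∀ (xs : List Int) (l r : Int),
    hi < (xs.length : Int) →
    pvGetA xs lo = p →
    (∀ i, lo < i → i ≤ hi → pvGetA xs i ≠ p) →
    lo < l → l ≤ r → r ≤ hi →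
    (∀ i, lo < i → i < l → pvGetA xs i < p) →
    (∀ i, r < i → i ≤ hi → pvGetA xs i > p) →
    ((l = lo + 1 ∧ r = hi ∧ (r - l).toNat + 2 ≤ fuel) ∨
      (l < r ∧ pvGetA xs l < p ∧ pvGetA xs r > p ∧ (r - l).toNat + 1 ≤ fuel)) →
    (pvLoopA xs p lo hi l r fuel).2 = lo + (pvCnt xs lo hi p : Int) := by
  induction fuel with
  | zero =>
    intro xs l r _ _ _ _ _ _ _ _ hbr
    rcases hbr with ⟨_, _, hf⟩ | ⟨_, _, _, hf⟩ <;> omega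
  | succ n ih =>
    intro xs l r hlen hplo huniq hll hlr hrh hinvl hinvr hbr
    have hlhi : l ≤ hi := le_trans hlr hrh
    have hlor : lo ≤ r := le_trans (le_of_lt hll) hlr
    obtain ⟨hs1, hs2, hs3, hs4⟩ :=
      leftScan_spec xs p hi (xs.length + 2) l hlhi (by omega)
    obtain ⟨ht1, ht2, ht3, ht4⟩ :=
      rightScan_spec xs p lo hplo (xs.length + 2) r hlor (by omega)
    set l' := pvLeftScanA xs p hi l (xs.length + 2) with hl'
    set r' := pvRightScanA xs p lo r (xs.length + 2) with hr'
    have Lleft : ∀ i, lo < i → i < l' → pvGetA xs i < p := by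
      intro i h1 h2
      by_cases h : i < l
      · exact hinvl i h1 h
      · exact hs3 i (by omega) h2
    have Rright : ∀ i, r' < i → i ≤ hi → pvGetA xs i > p := by
      intro i h1 h2
      by_cases h : r < i
      · exact hinvr i h h2
      · exact ht3 i h1 (by omega)
    rw [pvLoopA]
    by_cases hc : l' < r'
    · rw [if_pos hc]
      have hl'hi : l' < hi := by omega
      have hxl' : pvGetA xs l' > p := by
        rcases hs4 with h | h
        · omega
        · rcases lt_trichotomy (pvGetA xs l') p with hq | hq | hq
          · exact absurd hq h
          · exact absurd hq (huniq l' (by omega) (by omega))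
          · exact hq
      have hxr' : pvGetA xs r' < p := by
        rcases lt_trichotomy (pvGetA xs r') p with hq | hq | hq
        · exact hq
        · exact absurd hq (huniq r' (by omega) (by omega))
        · exact absurd hq ht4
      have gy : ∀ i, 0 ≤ i → pvGetA (pvSwapA xs l' r') i =
          if i = r' then pvGetA xs l' else if i = l' then pvGetA xs r' else pvGetA xs i :=
        fun i hi0 =>
          pvGetA_swap xs l' r' i (by omega) (by omega) (by omega) (by omega) hi0
      have hfuel : (r' - l').toNat + 1 ≤ n := by
        rcases hbr with ⟨hb1, hb2, hb3⟩ | ⟨hb1, hb2, hb3, hb4⟩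
        · omega
        · -- post-swap state: both scans advance at least one step
          have hstepl : pvLeftScanA xs p hi l (xs.length + 2)
              = pvLeftScanA xs p hi (l + 1) (xs.length + 1) :=
            leftScan_step xs p hi l (xs.length + 1) ⟨hb2, by omega⟩
          have hadvl := (leftScan_spec xs p hi (xs.length + 1) (l + 1)
            (by omega) (by omega)).1
          rw [← hstepl] at hadvl
          have hstepr : pvRightScanA xs p lo r (xs.length + 2)
              = pvRightScanA xs p lo (r - 1) (xs.length + 1) :=
            rightScan_step xs p lo r (xs.length + 1) ⟨hb3, by omega⟩
          have hadvr := (rightScan_spec xs p lo hplo (xs.length + 1) (r - 1)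
            (by omega) (by omega)).2.1
          rw [← hstepr] at hadvr
          rw [← hl'] at hadvl
          rw [← hr'] at hadvr
          omega
      have hres := ih (pvSwapA xs l' r') l' r'
        (by rw [length_pvSwapA]; exact hlen)
        (by rw [gy lo h0, if_neg (by omega), if_neg (by omega)]; exact hplo)
        (by
          intro i h1 h2
          rw [gy i (by omega)]
          by_cases e1 : i = r'
          · rw [if_pos e1]; intro hh; exact absurd hh (by omega)
          · rw [if_neg e1]
            by_cases e2 : i = l'
            · rw [if_pos e2]; intro hh; exact absurd hh (by omega)
            · rw [if_neg e2]; exact huniq i h1 h2)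
        (by omega) (le_of_lt hc) (by omega)
        (by
          intro i h1 h2
          rw [gy i (by omega), if_neg (by omega), if_neg (by omega)]
          exact Lleft i h1 h2)
        (by
          intro i h1 h2
          rw [gy i (by omega), if_neg (by omega), if_neg (by omega)]
          exact Rright i h1 h2)
        (Or.inr ⟨hc,
          by rw [gy l' (by omega), if_neg (by omega), if_pos rfl]; exact hxr',
          by rw [gy r' (by omega), if_pos rfl]; exact hxl',
          hfuel⟩)
      rw [hres, pvCnt_swap xs l' r' lo hi p h0 (by omega) (by omega) (by omega) (by omega) hlen]
    · rw [if_neg hc]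
      have hr'lo : lo ≤ r' := ht1
      have hcnt : (pvCnt xs lo hi p : Int) = r' - lo := by
        apply pvCnt_partitioned xs lo hi p r' hr'lo (by omega) hplo
        · intro i h1 h2
          rcases lt_or_eq_of_le h2 with h | h
          · exact Lleft i h1 (by omega)
          · rcases lt_trichotomy (pvGetA xs i) p with hq | hq | hq
            · exact hq
            · exact absurd hq (huniq i h1 (by omega))
            · rw [h] at hq
              exact absurd hq ht4
        · intro i h1 h2
          exact fun hh => absurd (Rright i h1 h2) (by omega)
      simp only []
      omega

-- ----- the two pivot computations agree (A's recursion = B's reduction loop) -----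

theorem pvMediansB_eq (arr : List Int) : pvMediansB arr = pvMediansA arr := by
  simp only [pvMediansB, pvMediansA, PySem.List.foldl_append_singleton_eq_map,
    PySem.List.length_sorted, List.map_map, List.nil_append]
  rfl

-- the median picked from a list (B's final step and A's base case)
def pvPick (xs : List Int) : Int :=
  PySem.List.pyGetD (PySem.List.sorted xs id false) (PySem.Int.floordiv (xs.length : Int) 2) 0

theorem pvMediansA_eq_map (arr : List Int) :
    pvMediansA arr = (PySem.List.pyRange 0 (arr.length : Int) 5).map
      (fun j => pvPick (PySem.List.slice arr (some j) (some (j + 5)))) := by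
  simp only [pvMediansA, PySem.List.foldl_append_singleton_eq_map, List.map_map,
    List.nil_append]
  rfl

theorem pvMediansA_length (arr : List Int) :
    (pvMediansA arr).length =
      (if (0 : Int) < arr.length then (((arr.length : Int) + 4) / 5).toNat else 0) := by
  rw [pvMediansA_eq_map, List.length_map,
    PySem.List.pyRange_of_pos 0 (arr.length : Int) (by norm_num : (0 : Int) < 5),
    List.length_map, List.length_range]
  split_ifs <;> omega

theorem pvReduceB_of_short (fuel : Nat) (cur : List Int) (h : cur.length ≤ 5) :
    pvReduceB fuel cur = cur := by
  cases fuel with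
  | zero => rfl
  | succ n => simp [pvReduceB, Nat.not_lt.mpr h]

theorem pvMediansA_short (arr : List Int) (h0 : arr ≠ []) (h5 : arr.length ≤ 5) :
    pvMediansA arr = [pvPick arr] := by
  have hpos : 1 ≤ arr.length := List.length_pos_iff.mpr h0
  have hlen : (0 : Int) < arr.length := by exact_mod_cast hpos
  have hrange : PySem.List.pyRange 0 (arr.length : Int) 5 = [0] := by
    rw [PySem.List.pyRange_of_pos 0 (arr.length : Int) (by norm_num : (0 : Int) < 5),
      if_pos hlen]
    have h1 : (((arr.length : Int) - 0 + 5 - 1) / 5).toNat = 1 := by omega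
    rw [h1]
    decide
  have hslice : PySem.List.slice arr (some 0) (some 5) = arr := by
    rw [PySem.List.slice_toNat arr (by norm_num) (by norm_num)]
    simp [List.take_of_length_le h5]
  rw [pvMediansA_eq_map, hrange]
  simp [hslice]

theorem pvPick_singleton (x : Int) : pvPick [x] = x := by
  have h : PySem.List.sorted [x] id false = [x] :=
    List.perm_singleton.mp (PySem.List.sorted_perm [x] id false)
  simp [pvPick, h, PySem.Int.floordiv]

theorem pvPick_nil : pvPick [] = 0 := by
  simp [pvPick, PySem.Int.floordiv]
  rfl

-- A's recursive med_of_meds equals B's iterative reduction followed by the final pick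
theorem med_eq (fuel : Nat) (arr : List Int) (hfuel : arr.length ≤ fuel) :
    med_of_meds fuel arr = pvPick (pvReduceB fuel arr) := by
  induction fuel generalizing arr with
  | zero =>
    have : arr = [] := List.length_eq_zero_iff.mp (Nat.le_zero.mp hfuel)
    subst this
    rw [pvReduceB_of_short _ _ (by decide), pvPick_nil]
    rfl
  | succ n ih =>
    by_cases hshort : arr.length ≤ 5
    · rw [pvReduceB_of_short _ _ hshort]
      rcases List.eq_nil_or_concat arr with hnil | _
      · subst hnil
        rw [pvPick_nil, med_of_meds]
        simp [pvMediansA_eq_map]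
        rfl
      · have hne : arr ≠ [] := by rintro rfl; simp_all
        rw [med_of_meds]
        simp only [pvMediansA_short arr hne hshort]
        simpa using pvPick_singleton (pvPick arr)
    · rw [Nat.not_le] at hshort
      have hred : pvReduceB (n + 1) arr = pvReduceB n (pvMediansB arr) := by
        simp [pvReduceB, hshort]
      rw [hred, pvMediansB_eq, med_of_meds]
      set M := pvMediansA arr with hM
      have hMlen : M.length = (((arr.length : Int) + 4) / 5).toNat := by
        rw [hM, pvMediansA_length]
        have h0 : (0 : Int) < arr.length := by
          exact_mod_cast Nat.lt_of_lt_of_le (by norm_num) (le_of_lt hshort)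
        rw [if_pos h0]
      by_cases hM5 : M.length ≤ 5
      · simp only [hM5, if_true]
        rw [pvReduceB_of_short n M hM5]
        rfl
      · simp only [hM5, if_false]
        apply ih
        omega

-- ----- the pivot is an element of the sliced range -----

theorem pvPick_mem (xs : List Int) (h : xs ≠ []) : pvPick xs ∈ xs := by
  have hpos : 1 ≤ xs.length := List.length_pos_iff.mpr h
  have hmem : PySem.List.pyGetD (PySem.List.sorted xs id false)
      (PySem.Int.floordiv (xs.length : Int) 2) 0 ∈ PySem.List.sorted xs id false := by
    apply PySem.List.pyGetD_mem
    have hl : (PySem.List.sorted xs id false).length = xs.length :=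
      PySem.List.length_sorted xs id false
    simp only [PySem.Raise.InRange, hl, PySem.Int.floordiv, Int.fdiv_eq_ediv]
    omega
  rw [pvPick]
  exact (PySem.List.mem_sorted xs id false _).mp hmem

theorem pvMediansA_subset (arr : List Int) (x : Int) (hx : x ∈ pvMediansA arr) : x ∈ arr := by
  rw [pvMediansA_eq_map] at hx
  obtain ⟨j, hj, hxe⟩ := List.mem_map.mp hx
  obtain ⟨hj0, hjlen, -⟩ :=
    (PySem.List.mem_pyRange_iff_of_pos (by norm_num : (0 : Int) < 5) j).mp hj
  have hne : PySem.List.slice arr (some j) (some (j + 5)) ≠ [] := by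
    rw [PySem.List.slice_toNat arr hj0 (by omega)]
    intro hcon
    have := congrArg List.length hcon
    simp only [List.length_take, List.length_drop, List.length_nil] at this
    omega
  apply PySem.List.mem_of_mem_slice (a? := some j) (b? := some (j + 5))
  exact hxe ▸ pvPick_mem _ hne

theorem mem_med (fuel : Nat) (arr : List Int) (hne : arr ≠ []) (hfuel : arr.length ≤ fuel) :
    med_of_meds fuel arr ∈ arr := by
  induction fuel generalizing arr with
  | zero => exact absurd (List.length_eq_zero_iff.mp (Nat.le_zero.mp hfuel)) hne
  | succ n ih =>
    rw [med_of_meds]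
    have hpos : 1 ≤ arr.length := List.length_pos_iff.mpr hne
    have hMlen : (pvMediansA arr).length = (((arr.length : Int) + 4) / 5).toNat := by
      rw [pvMediansA_length, if_pos (by exact_mod_cast hpos)]
    have hMne : pvMediansA arr ≠ [] := by
      intro hcon
      rw [hcon] at hMlen
      simp at hMlen
      omega
    by_cases h5 : (pvMediansA arr).length ≤ 5
    · rw [if_pos h5]
      exact pvMediansA_subset arr _ (pvPick_mem _ hMne)
    · rw [if_neg h5]
      exact pvMediansA_subset arr _ (ih (pvMediansA arr) hMne (by omega))

-- ----- slices as maps over index ranges -----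

theorem slice_eq_map_range (xs : List Int) (a b : Int) (h0 : 0 ≤ a) (hab : a ≤ b)
    (hb : b ≤ (xs.length : Int)) :
    PySem.List.slice xs (some a) (some b)
      = (List.range (b - a).toNat).map (fun k : Nat => pvGetA xs (a + (k : Int))) := by
  rw [PySem.List.slice_toNat xs h0 (by omega)]
  apply List.ext_getElem
  · simp only [List.length_take, List.length_drop, List.length_map, List.length_range]
    omega
  · intro i h1 h2
    simp only [List.getElem_take, List.getElem_drop, List.getElem_map, List.getElem_range]
    rw [pvGetA_nonneg _ _ (by omega)]
    have hidx : (a + (i : Int)).toNat = a.toNat + i := by omega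
    rw [hidx]
    rw [List.getD_eq_getElem _ _ (by
      simp only [List.length_take, List.length_drop] at h1
      omega)]

-- ----- assembly -----

theorem partition_w_median_eq (xs : List Int) (lo hi : Int)
    (h0 : 0 ≤ lo) (hlh : lo < hi) (hlen : hi < (xs.length : Int))
    (hnd : (PySem.List.slice xs (some lo) (some (hi + 1))).Nodup) :
    partition_w_median xs lo hi = partition_w_median_alt xs lo hi := by
  have hne : lo ≠ hi := by omega
  simp only [partition_w_median, partition_w_median_alt, if_neg hne]
  set s := PySem.List.slice xs (some lo) (some hi) with hs
  set p := med_of_meds (s.length + 1) s with hp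
  -- B's pivot is the same value
  have hBp : PySem.List.pyGetD
      (PySem.List.sorted (pvReduceB (s.length + 1) s) id false)
      (PySem.Int.floordiv ((pvReduceB (s.length + 1) s).length : Int) 2) 0 = p := by
    rw [hp, med_eq _ _ (Nat.le_succ _)]
    rfl
  rw [hBp]
  -- the sliced range as a map over indices
  have hsmap : s = (List.range (hi - lo).toNat).map (fun k : Nat => pvGetA xs (lo + (k : Int))) :=
    slice_eq_map_range xs lo hi h0 (le_of_lt hlh) (by omega)
  have hslen : s.length = (hi - lo).toNat := by
    rw [hsmap, List.length_map, List.length_range]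
  have hsne : s ≠ [] := by
    intro hcon
    rw [hcon] at hslen
    simp at hslen
    omega
  -- the pivot occurs in the slice; locate it
  have hpmem : p ∈ s := hp ▸ mem_med _ _ hsne (Nat.le_succ _)
  obtain ⟨k, hk⟩ := Option.isSome_iff_exists.mp
    ((PySem.List.index?_isSome_iff s p).mpr hpmem)
  obtain ⟨hklt, hkval, -⟩ := PySem.List.getElem_of_index?_eq_some hk
  have hm : get_index_of_nearest_median xs lo hi p = lo + (k : Int) := by
    rw [get_index_of_nearest_median, if_neg hne, ← hs, hk]
    rfl
  rw [hm]
  have hmhi : lo + (k : Int) < hi := by omega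
  -- value at the located index
  have hgm : pvGetA xs (lo + (k : Int)) = p := by
    have h9 : s[k]? = some p := by rw [List.getElem?_eq_getElem hklt, hkval]
    rw [hsmap, List.getElem?_map, List.getElem?_range (by omega : k < (hi - lo).toNat)] at h9
    simpa using h9
  -- the inclusive region as a map over indices, and uniqueness of the pivot value
  have hRmap : PySem.List.slice xs (some lo) (some (hi + 1))
      = (List.range (hi + 1 - lo).toNat).map (fun k : Nat => pvGetA xs (lo + (k : Int))) :=
    slice_eq_map_range xs lo (hi + 1) h0 (by omega) (by omega)
  have hndL : ((List.range (hi + 1 - lo).toNat).map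
      (fun k : Nat => pvGetA xs (lo + (k : Int)))).Nodup := hRmap ▸ hnd
  have huq : ∀ i, lo ≤ i → i ≤ hi → i ≠ lo + (k : Int) → pvGetA xs i ≠ p := by
    intro i h1 h2 h3 hcon
    have hj1 : (i - lo).toNat < (hi + 1 - lo).toNat := by omega
    have hj2 : k < (hi + 1 - lo).toNat := by omega
    have hvals : ((List.range (hi + 1 - lo).toNat).map
          (fun k : Nat => pvGetA xs (lo + (k : Int))))[(i - lo).toNat]'(by
            simp only [List.length_map, List.length_range]; omega)
        = ((List.range (hi + 1 - lo).toNat).map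
          (fun k : Nat => pvGetA xs (lo + (k : Int))))[k]'(by
            simp only [List.length_map, List.length_range]; omega) := by
      simp only [List.getElem_map, List.getElem_range]
      rw [(by omega : lo + ((i - lo).toNat : Int) = i), hcon, hgm]
    have := (List.Nodup.getElem_inj_iff hndL).mp hvals
    omega
  -- the swapped list: pivot now sits at position lo, uniquely in the region
  have hlen1 : (pvSwapA xs lo (lo + (k : Int))).length = xs.length :=
    length_pvSwapA xs lo (lo + (k : Int))
  have hswget : ∀ i, 0 ≤ i → pvGetA (pvSwapA xs lo (lo + (k : Int))) i =
      if i = lo + (k : Int) then pvGetA xs lo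
      else if i = lo then pvGetA xs (lo + (k : Int)) else pvGetA xs i :=
    fun i hi0 => pvGetA_swap xs lo (lo + (k : Int)) i h0 (by omega) (by omega) (by omega) hi0
  have hp1 : pvGetA (pvSwapA xs lo (lo + (k : Int))) lo = p := by
    rw [hswget lo h0]
    by_cases e : lo = lo + (k : Int)
    · rw [if_pos e, e, hgm]
    · rw [if_neg e, if_pos rfl, hgm]
  have huq1 : ∀ i, lo < i → i ≤ hi → pvGetA (pvSwapA xs lo (lo + (k : Int))) i ≠ p := by
    intro i h1 h2
    rw [hswget i (by omega)]
    by_cases e1 : i = lo + (k : Int)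
    · rw [if_pos e1]
      exact huq lo (le_refl lo) (by omega) (by omega)
    · rw [if_neg e1, if_neg (by omega : ¬ i = lo)]
      exact huq i (by omega) h2 e1
  -- run the loop
  rw [hp1]
  have hloop := loop_lemma p lo hi h0 hlh ((pvSwapA xs lo (lo + (k : Int))).length + 2)
    (pvSwapA xs lo (lo + (k : Int))) (lo + 1) hi
    (by rw [hlen1]; exact hlen) hp1 huq1 (by omega) (by omega) (le_refl hi)
    (fun i h1 h2 => absurd h2 (by omega))
    (fun i h1 h2 => absurd h1 (by omega))
    (Or.inl ⟨rfl, rfl, by omega⟩)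
  rw [hloop,
    pvCnt_swap xs lo (lo + (k : Int)) lo hi p h0 (le_refl lo) (by omega) (by omega)
      (by omega) hlen]
  -- B's count equals pvCnt
  have hsm : (List.filter (fun x => decide (x < p))
        (PySem.List.slice xs (some lo) (some (hi + 1)))).length = pvCnt xs lo hi p := by
    rw [hRmap, List.filter_map, List.length_map, ← List.countP_eq_length_filter]
    rfl
  rw [hsm]

-- ===== VERDICT (by name: the statement is the Claim_ definition above) =====
theorem partition_w_median_spec : Claim_equal_partition_w_median := by
  intro xs lo hi _ hpre
  unfold Spec_partition_w_median
  rcases hpre with h | ⟨h0, hlh, hlen, hnd⟩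
  · simp [partition_w_median, partition_w_median_alt, h]
  · exact partition_w_median_eq xs lo hi h0 hlh hlen hnd
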